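-- pv_equiv track=rewrite | github.com/Dirk-Hoffmann/Phosphoproteomics | scripts/kinase_prediction.py | indexConverter
-- ===== SOURCE A (Python) =====
-- def indexConverter(sequence1, sequence2, index1):
--     #converts index of phosphosite to index in Fasta sequence
--     for i in range(len(sequence2)):
--         x = 0
--         for n in range(len(sequence1)):
--             x+=1
--             if sequence2[i+n]!=sequence1[n]:
--                 break
--         if x == len(sequence1):
--             return index1+i
-- ===== SOURCE B (Python) =====
-- def indexConverter(sequence1, sequence2, index1):
--     #converts index of phosphosite to index in Fasta sequence
--     pos = sequence2.find(sequence1)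
--     if pos == -1:
--         return None
--     return index1 + pos
-- ===== Notes on version B (the rewrite author's own statement) =====
-- stated objective: faster
-- what changed: replaces the hand-written nested window scan (which compares only the first len(sequence1)-1 characters of each window and can index past the end) by a single str.find of the whole sequence1 in sequence2
-- intended difference: on inputs where some window of sequence2 matches all but the last character of sequence1 before any full occurrence (including sequence1=''==sequence2, where A returns None), A returns index1 plus that spurious window's index because its inner loop counts the breaking comparison, while B returns index1 plus the index of the first FULL occurrence of sequence1 (or None), which is the intended behaviour — e.g. on indexConverter("ab", "ac", 0): A returns some 0, B returns none
import Mathlib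
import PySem

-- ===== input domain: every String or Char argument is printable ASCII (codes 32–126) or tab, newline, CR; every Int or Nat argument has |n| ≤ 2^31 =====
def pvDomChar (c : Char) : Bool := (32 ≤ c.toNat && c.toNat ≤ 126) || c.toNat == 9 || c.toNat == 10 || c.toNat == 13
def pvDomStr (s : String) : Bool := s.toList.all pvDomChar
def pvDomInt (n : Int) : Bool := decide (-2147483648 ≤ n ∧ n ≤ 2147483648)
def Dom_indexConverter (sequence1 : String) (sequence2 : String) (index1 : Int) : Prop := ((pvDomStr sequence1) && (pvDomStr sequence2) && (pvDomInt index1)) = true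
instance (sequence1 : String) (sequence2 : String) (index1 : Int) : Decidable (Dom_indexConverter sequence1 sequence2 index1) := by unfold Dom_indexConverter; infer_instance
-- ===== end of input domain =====

-- B replaces A's hand-written nested scan (which only checks the first len(sequence1)-1
-- characters of each window and can index past the end) by a single str.find of the whole
-- sequence1 in sequence2 (measurably faster; O(n*m) scan -> str.find); A differs on D_ below, A raises
-- (IndexError) exactly outside Pre_ below.

-- ===== PORT A =====
-- Inner 'for n in range(len(sequence1))' loop, iterating over sequence1's characters
-- (a = not-yet-compared rest of sequence1, n the running index, x the counter); returns none
-- exactly where Python raises IndexError on sequence2[i+n]; sequence1[n] is the head of a.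
def pvInnerA (l2 : List Char) (i : Nat) : List Char → Nat → Nat → Option Nat
  | [], _, x => some x
  | c :: rest, n, x =>
    match PySem.List.pyGet? l2 ((i : Int) + (n : Int)) with
    | none => none                                   -- IndexError
    | some d => if d ≠ c then some (x + 1) else pvInnerA l2 i rest (n + 1) (x + 1)

-- Outer 'for i in range(len(sequence2))' loop (rem counts the remaining iterations);
-- some v = Python returns v, none = IndexError.
def pvOuterA (l1 l2 : List Char) (idx : Int) : List Char → Nat → Option (Option Int)
  | [], _ => some none                               -- loop falls through: Python returns None
  | _ :: rem, i =>
    match pvInnerA l2 i l1 0 0 with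
    | none => none                                   -- IndexError propagates
    | some x => if x = l1.length then some (some (idx + (i : Int))) else pvOuterA l1 l2 idx rem (i + 1)

def indexConverter (sequence1 : String) (sequence2 : String) (index1 : Int) : Option Int :=
  -- on raising inputs (excluded by Pre_) the port returns none
  (pvOuterA sequence1.toList sequence2.toList index1 sequence2.toList 0).getD none

-- ===== PORT B =====
def indexConverter_alt (sequence1 : String) (sequence2 : String) (index1 : Int) : Option Int :=
  let pos := PySem.Str.find sequence2 sequence1
  if pos = -1 then none else some (index1 + pos)

-- ===== PRECONDITION & SPEC =====
-- A's inner loop accepts window i iff the first len(sequence1)-1 characters match and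
-- position i+len-1 is still in range (the breaking comparison is counted in x).
def pvAccept (l1 l2 : List Char) (i : Nat) : Prop :=
  i + l1.length ≤ l2.length ∧ l1.dropLast <+: l2.drop i

-- A's inner loop raises IndexError at window i iff the whole tail of sequence2 from i is a
-- proper prefix of sequence1 (the scan runs off the end of sequence2).
def pvRaiseA (l1 l2 : List Char) (i : Nat) : Prop :=
  l2.length - i < l1.length ∧ l2.drop i <+: l1

-- Pre_ excludes exactly the inputs where A raises IndexError (no accepted window, and some
-- tail of sequence2 is a proper prefix of sequence1); B returns the plain find result there.
def Pre_indexConverter (sequence1 : String) (sequence2 : String) (index1 : Int) : Prop :=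
  (∃ i < sequence2.toList.length + 1, pvAccept sequence1.toList sequence2.toList i) ∨
  (∀ i < sequence2.toList.length, ¬ pvRaiseA sequence1.toList sequence2.toList i)
instance (sequence1 : String) (sequence2 : String) (index1 : Int) : Decidable (Pre_indexConverter sequence1 sequence2 index1) := by unfold Pre_indexConverter pvAccept pvRaiseA; infer_instance

def pvWitness_indexConverter : String × String × Int := ("ab", "xab", 0)

-- On inputs where some window of sequence2 matches all but the last character of sequence1
-- before any full occurrence (including sequence1 = sequence2 = ''), A returns index1 plus
-- that spurious window's index (or None for ''/'') because its inner loop counts the breaking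
-- comparison, while B returns index1 plus the index of the first FULL occurrence of sequence1
-- (or None), which is the intended behaviour.
def D_indexConverter (sequence1 : String) (sequence2 : String) (index1 : Int) : Prop :=
  (sequence1.toList = [] ∧ sequence2.toList = []) ∨
  (sequence1.toList ≠ [] ∧ ∃ i < sequence2.toList.length + 1,
    pvAccept sequence1.toList sequence2.toList i ∧
    ∀ j ≤ i, ¬ (sequence1.toList <+: sequence2.toList.drop j))
instance (sequence1 : String) (sequence2 : String) (index1 : Int) : Decidable (D_indexConverter sequence1 sequence2 index1) := by unfold D_indexConverter pvAccept; infer_instance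

def Spec_indexConverter (sequence1 : String) (sequence2 : String) (index1 : Int) (out : Option Int) : Prop := ¬ D_indexConverter sequence1 sequence2 index1 → out = indexConverter_alt sequence1 sequence2 index1
instance (sequence1 : String) (sequence2 : String) (index1 : Int) (out : Option Int) : Decidable (Spec_indexConverter sequence1 sequence2 index1 out) := by unfold Spec_indexConverter; infer_instance

def pvDiffWitness_indexConverter : String × String × Int := ("ab", "ac", 0)
def pvDiffWitnessOut_indexConverter : (Option Int) × (Option Int) := (some 0, none)

-- ===== CLAIM (what is proved, stated in full; the proofs are below) =====
def Claim_unchanged_indexConverter : Prop := ∀ (sequence1 : String) (sequence2 : String) (index1 : Int), Dom_indexConverter sequence1 sequence2 index1 → Pre_indexConverter sequence1 sequence2 index1 → Spec_indexConverter sequence1 sequence2 index1 (indexConverter sequence1 sequence2 index1)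
def Claim_changed_indexConverter : Prop := Dom_indexConverter (pvDiffWitness_indexConverter.1) (pvDiffWitness_indexConverter.2.1) (pvDiffWitness_indexConverter.2.2) ∧ Pre_indexConverter (pvDiffWitness_indexConverter.1) (pvDiffWitness_indexConverter.2.1) (pvDiffWitness_indexConverter.2.2) ∧ D_indexConverter (pvDiffWitness_indexConverter.1) (pvDiffWitness_indexConverter.2.1) (pvDiffWitness_indexConverter.2.2) ∧ indexConverter (pvDiffWitness_indexConverter.1) (pvDiffWitness_indexConverter.2.1) (pvDiffWitness_indexConverter.2.2) = pvDiffWitnessOut_indexConverter.1 ∧ indexConverter_alt (pvDiffWitness_indexConverter.1) (pvDiffWitness_indexConverter.2.1) (pvDiffWitness_indexConverter.2.2) = pvDiffWitnessOut_indexConverter.2 ∧ pvDiffWitnessOut_indexConverter.1 ≠ pvDiffWitnessOut_indexConverter.2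
def Claim_exact_indexConverter : Prop := ∀ (sequence1 : String) (sequence2 : String) (index1 : Int), Dom_indexConverter sequence1 sequence2 index1 → Pre_indexConverter sequence1 sequence2 index1 → D_indexConverter sequence1 sequence2 index1 → indexConverter sequence1 sequence2 index1 ≠ indexConverter_alt sequence1 sequence2 index1

-- ===== LEMMAS AND PROOFS =====

theorem pvWitness_ok : Dom_indexConverter (pvWitness_indexConverter.1) (pvWitness_indexConverter.2.1) (pvWitness_indexConverter.2.2) ∧ Pre_indexConverter (pvWitness_indexConverter.1) (pvWitness_indexConverter.2.1) (pvWitness_indexConverter.2.2) := by decide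

-- pure-list restatement of A's inner loop: a = rest of sequence1, b = rest of sequence2's tail
def pvCmp : List Char → List Char → Nat → Option Nat
  | [], _, x => some x
  | _ :: _, [], _ => none
  | c :: a, d :: b, x => if d ≠ c then some (x + 1) else pvCmp a b (x + 1)

theorem innerA_eq (l2 : List Char) (i : Nat) : ∀ (a : List Char) (n x : Nat), pvInnerA l2 i a n x = pvCmp a (l2.drop (i + n)) x := by
  intro a
  induction a with
  | nil => intro n x; cases l2.drop (i+n) <;> rfl
  | cons c rest ih =>
    intro n x
    have hcast : ((i : Int) + (n : Int)) = ((i + n : Nat) : Int) := by push_cast; ring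
    have hget : PySem.List.pyGet? l2 ((i : Int) + (n : Int)) = (l2.drop (i + n)).head? := by
      rw [hcast, PySem.List.pyGet?_natCast]
      cases h : l2.drop (i+n) with
      | nil =>
        have : l2.length ≤ i + n := by
          by_contra hc
          have := List.drop_eq_nil_iff.mp h
          omega
        simp [this]
      | cons d b =>
        have h0 : l2[i+n]? = (l2.drop (i+n))[0]? := by rw [List.getElem?_drop]; simp
        simp [h0, h]
    rw [pvInnerA, hget]
    cases h : l2.drop (i + n) with
    | nil => rfl
    | cons d b =>
      have hb : l2.drop (i + (n+1)) = b := by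
        have h2 := congrArg (List.drop 1) h
        rw [List.drop_drop] at h2
        simpa [show 1 + (i + n) = i + (n + 1) by omega] using h2
      simp only [List.head?_cons]
      by_cases hdc : d = c
      · rw [pvCmp, if_neg (by simp [hdc]), if_neg (by simp [hdc]), ih, hb]
      · rw [pvCmp, if_pos hdc, if_pos hdc]

theorem cmp_none_iff (a : List Char) : ∀ b x, pvCmp a b x = none ↔ (b.length < a.length ∧ b <+: a) := by
  induction a with
  | nil => intro b x; simp [pvCmp]
  | cons c a ih =>
    intro b x
    cases b with
    | nil => simp [pvCmp]
    | cons d b =>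
      by_cases h : d = c
      · subst h
        rw [pvCmp, if_neg (by simp), ih]
        simp [List.cons_prefix_cons]
      · rw [pvCmp, if_pos h]
        simp [List.cons_prefix_cons]
        intro _ hc; first | exact absurd hc h | exact absurd hc.symm h

theorem cmp_full_iff (a : List Char) : ∀ b x, pvCmp a b x = some (x + a.length) ↔ (a.length ≤ b.length ∧ a.dropLast <+: b) := by
  induction a with
  | nil => intro b x; simp [pvCmp]
  | cons c a ih =>
    intro b x
    cases b with
    | nil => simp [pvCmp]
    | cons d b =>
      cases a with
      | nil =>
        by_cases h : d = c
        · rw [pvCmp, if_neg (by simp [h])]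
          simp [pvCmp]
        · rw [pvCmp, if_pos h]
          simp
      | cons c2 a2 =>
        by_cases h : d = c
        · rw [pvCmp, if_neg (by simp [h])]
          have hlen : x + (c :: c2 :: a2).length = (x + 1) + (c2 :: a2).length := by simp; omega
          rw [hlen, ih]
          subst h
          simp [List.cons_prefix_cons]
        · rw [pvCmp, if_pos h]
          simp [List.cons_prefix_cons]
          intro _ hc; first | exact absurd hc h | exact absurd hc.symm h

-- inner loop at window i, phrased through the predicates of the claim
theorem inner_none_iff (l1 l2 : List Char) (i : Nat) : pvInnerA l2 i l1 0 0 = none ↔ pvRaiseA l1 l2 i := by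
  rw [innerA_eq, cmp_none_iff]
  unfold pvRaiseA
  simp

theorem inner_full_iff (l1 l2 : List Char) (i : Nat) (hi : i ≤ l2.length) : pvInnerA l2 i l1 0 0 = some l1.length ↔ pvAccept l1 l2 i := by
  rw [innerA_eq, show l1.length = 0 + l1.length by omega, cmp_full_iff]
  unfold pvAccept
  simp only [List.length_drop]
  constructor
  · rintro ⟨h1, h2⟩; exact ⟨by omega, h2⟩
  · rintro ⟨h1, h2⟩; exact ⟨by omega, h2⟩

theorem full_imp_accept (l1 l2 : List Char) (j : Nat) (h1 : l1 ≠ []) (h : l1 <+: l2.drop j) : pvAccept l1 l2 j := by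
  have hlen := h.length_le
  rw [List.length_drop] at hlen
  have hne : l1.length ≠ 0 := by simpa using h1
  refine ⟨by omega, List.IsPrefix.trans (List.dropLast_prefix l1) h⟩

theorem outer_found (l1 l2 : List Char) (idx : Int) (j : Nat) (hj : j < l2.length) (hacc : pvAccept l1 l2 j) (hmin : ∀ k, k < j → ¬ pvAccept l1 l2 k) : ∀ (rem : List Char) (i : Nat), i + rem.length = l2.length → i ≤ j → pvOuterA l1 l2 idx rem i = some (some (idx + (j : Int))) := by
  intro rem
  induction rem with
  | nil => intro i h1 h2; simp at h1; omega
  | cons _ rem ih =>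
    intro i h1 h2
    have hi : i < l2.length := by simp at h1; omega
    rw [pvOuterA]
    rcases Nat.lt_or_ge i j with hij | hij
    · have hnacc : ¬ pvAccept l1 l2 i := hmin i hij
      have hnr : ¬ pvRaiseA l1 l2 i := by
        unfold pvRaiseA
        rintro ⟨hr1, _⟩
        have := hacc.1
        omega
      cases hx : pvInnerA l2 i l1 0 0 with
      | none => exact absurd ((inner_none_iff l1 l2 i).mp hx) hnr
      | some x =>
        have hxne : x ≠ l1.length := by
          intro hxe; subst hxe
          exact hnacc ((inner_full_iff l1 l2 i (by omega)).mp hx)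
        simp only [if_neg hxne]
        exact ih (i+1) (by simp at h1 ⊢; omega) (by omega)
    · have hij' : i = j := by omega
      subst hij'
      simp [(inner_full_iff l1 l2 i (by omega)).mpr hacc]

theorem outer_none (l1 l2 : List Char) (idx : Int) (hnoacc : ∀ k, ¬ pvAccept l1 l2 k) (hnor : ∀ i, i < l2.length → ¬ pvRaiseA l1 l2 i) : ∀ (rem : List Char) (i : Nat), i + rem.length = l2.length → pvOuterA l1 l2 idx rem i = some none := by
  intro rem
  induction rem with
  | nil => intro i _; rfl
  | cons _ rem ih =>
    intro i h1
    have hi : i < l2.length := by simp at h1; omega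
    rw [pvOuterA]
    cases hx : pvInnerA l2 i l1 0 0 with
    | none => exact absurd ((inner_none_iff l1 l2 i).mp hx) (hnor i hi)
    | some x =>
      have hxne : x ≠ l1.length := by
        intro hxe; subst hxe
        exact hnoacc i ((inner_full_iff l1 l2 i (by omega)).mp hx)
      simp only [if_neg hxne]
      exact ih (i+1) (by simp at h1 ⊢; omega)

-- B's find as the minimal full-occurrence index
theorem find_eq_min_full (l1 l2 : List Char) (j0 : Nat) (hfull : l1 <+: l2.drop j0) (hmin : ∀ k, k < j0 → ¬ l1 <+: l2.drop k) : PySem.Chars.find l2 l1 = (j0 : Int) := by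
  have hin : PySem.Chars.isIn l1 l2 = true := (PySem.Chars.exists_prefix_drop_iff_isIn l1 l2).mp ⟨j0, hfull⟩
  have hinf : l1 <:+: l2 := (PySem.Chars.isIn_iff_infix l1 l2).mp hin
  have hnn : 0 ≤ PySem.Chars.find l2 l1 := (PySem.Chars.find_nonneg_iff l2 l1).mpr hinf
  obtain ⟨hpre, hbelow⟩ := PySem.Chars.find_spec hnn
  have h1 : ¬ (PySem.Chars.find l2 l1).toNat < j0 := fun hlt => hmin _ hlt hpre
  have h2 : ¬ j0 < (PySem.Chars.find l2 l1).toNat := fun hlt => hbelow j0 hlt hfull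
  omega

theorem find_eq_neg_one_of_no_full (l1 l2 : List Char) (h : ∀ k, ¬ l1 <+: l2.drop k) : PySem.Chars.find l2 l1 = -1 := by
  rw [PySem.Chars.find_eq_neg_one_iff]
  intro hinf
  obtain ⟨j, hj⟩ := (PySem.Chars.exists_prefix_drop_iff_isIn l1 l2).mpr ((PySem.Chars.isIn_iff_infix l1 l2).mpr hinf)
  exact h j hj

-- the two sides compared, at the level of character lists
theorem main_eq (l1 l2 : List Char) (idx : Int)
    (hPre : (∃ i < l2.length + 1, pvAccept l1 l2 i) ∨ (∀ i < l2.length, ¬ pvRaiseA l1 l2 i))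
    (hD : ¬ ((l1 = [] ∧ l2 = []) ∨ (l1 ≠ [] ∧ ∃ i < l2.length + 1, pvAccept l1 l2 i ∧ ∀ j ≤ i, ¬ (l1 <+: l2.drop j)))) :
    (pvOuterA l1 l2 idx l2 0).getD none =
      (if PySem.Chars.find l2 l1 = -1 then none else some (idx + PySem.Chars.find l2 l1)) := by
  haveI : DecidablePred (pvAccept l1 l2) := fun k => by unfold pvAccept; infer_instance
  by_cases hacc : ∃ j, pvAccept l1 l2 j
  · -- A returns at the first accepted window; ¬D_ forces it to be the first full occurrence
    have hj0 : pvAccept l1 l2 (Nat.find hacc) := Nat.find_spec hacc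
    have hmin : ∀ k, k < Nat.find hacc → ¬ pvAccept l1 l2 k := fun k hk => Nat.find_min hacc hk
    rcases List.eq_nil_or_concat l1 with h1 | h1
    · -- sequence1 = '': A accepts window 0 iff sequence2 ≠ '' (else D_); find('') = 0
      subst h1
      have h2 : l2 ≠ [] := fun hnil => hD (Or.inl ⟨rfl, hnil⟩)
      have hlen : 0 < l2.length := by
        cases l2 with | nil => exact absurd rfl h2 | cons _ _ => simp
      have hacc0 : pvAccept [] l2 0 := ⟨by simp, by simp⟩
      rw [outer_found [] l2 idx 0 hlen hacc0 (by omega) l2 0 (by simp) (by omega)]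
      rw [PySem.Chars.find_nil]
      simp
    · have hne : l1 ≠ [] := by rcases h1 with ⟨_, _, h1⟩; simp [h1]
      have hn1 : 1 ≤ l1.length := by
        cases hc : l1 with | nil => exact absurd hc hne | cons _ _ => simp
      have hj0lt : Nat.find hacc < l2.length := by have := hj0.1; omega
      rw [outer_found l1 l2 idx (Nat.find hacc) hj0lt hj0 hmin l2 0 (by simp) (by omega)]
      -- from ¬D_: some full occurrence lies at or before the first accepted window
      have hstep : ∃ j ≤ Nat.find hacc, l1 <+: l2.drop j := by
        by_contra hno
        push_neg at hno
        exact hD (Or.inr ⟨hne, Nat.find hacc, by omega, hj0, fun j hj => hno j hj⟩)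
      obtain ⟨j, hjle, hjfull⟩ := hstep
      have hjeq : j = Nat.find hacc := by
        have h3 := Nat.find_min' hacc (full_imp_accept l1 l2 j hne hjfull)
        omega
      subst hjeq
      have hminfull : ∀ k, k < Nat.find hacc → ¬ l1 <+: l2.drop k := fun k hk hf =>
        hmin k hk (full_imp_accept l1 l2 k hne hf)
      rw [find_eq_min_full l1 l2 (Nat.find hacc) hjfull hminfull]
      simp
  · -- no accepted window: A returns None without raising (Pre_), and there is no full occurrence
    push_neg at hacc
    have hnor : ∀ i, i < l2.length → ¬ pvRaiseA l1 l2 i := by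
      rcases hPre with h | h
      · obtain ⟨i, _, hi⟩ := h; exact absurd hi (hacc i)
      · exact h
    rw [outer_none l1 l2 idx hacc hnor l2 0 (by simp)]
    have hne : l1 ≠ [] := by
      intro h
      exact hacc 0 (by subst h; exact ⟨by simpa using Nat.zero_le _, by simp⟩)
    rw [find_eq_neg_one_of_no_full l1 l2 (fun k hf => hacc k (full_imp_accept l1 l2 k hne hf))]
    simp

theorem main_ne (l1 l2 : List Char) (idx : Int)
    (hD : (l1 = [] ∧ l2 = []) ∨ (l1 ≠ [] ∧ ∃ i < l2.length + 1, pvAccept l1 l2 i ∧ ∀ j ≤ i, ¬ (l1 <+: l2.drop j))) :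
    (pvOuterA l1 l2 idx l2 0).getD none ≠
      (if PySem.Chars.find l2 l1 = -1 then none else some (idx + PySem.Chars.find l2 l1)) := by
  haveI : DecidablePred (pvAccept l1 l2) := fun k => by unfold pvAccept; infer_instance
  rcases hD with ⟨h1, h2⟩ | ⟨hne, i, hilt, hiacc, hnofull⟩
  · -- '' in '': A returns None, B returns index1 + 0
    subst h1; subst h2
    simp [pvOuterA, PySem.Chars.find_nil]
  · have hacc : ∃ j, pvAccept l1 l2 j := ⟨i, hiacc⟩
    have hj0 : pvAccept l1 l2 (Nat.find hacc) := Nat.find_spec hacc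
    have hmin : ∀ k, k < Nat.find hacc → ¬ pvAccept l1 l2 k := fun k hk => Nat.find_min hacc hk
    have hj0le : Nat.find hacc ≤ i := Nat.find_min' hacc hiacc
    have hn1 : 1 ≤ l1.length := by
      cases hc : l1 with | nil => exact absurd hc hne | cons _ _ => simp
    have hj0lt : Nat.find hacc < l2.length := by have := hj0.1; omega
    rw [outer_found l1 l2 idx (Nat.find hacc) hj0lt hj0 hmin l2 0 (by simp) (by omega)]
    by_cases hfull : ∃ j, l1 <+: l2.drop j
    · -- the first full occurrence lies strictly after i ≥ the first accepted window
      haveI : DecidablePred (fun j => l1 <+: l2.drop j) := fun j => by infer_instance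
      have ht : l1 <+: l2.drop (Nat.find hfull) := Nat.find_spec hfull
      have htmin : ∀ k, k < Nat.find hfull → ¬ l1 <+: l2.drop k := fun k hk => Nat.find_min hfull hk
      have hti : i < Nat.find hfull := by
        by_contra hc
        exact hnofull (Nat.find hfull) (by omega) ht
      rw [find_eq_min_full l1 l2 (Nat.find hfull) ht htmin]
      simp only [Option.getD_some]
      intro hcontra
      rw [if_neg (by omega), Option.some_inj] at hcontra
      omega
    · push_neg at hfull
      rw [find_eq_neg_one_of_no_full l1 l2 hfull]
      simp

theorem indexConverter_spec : Claim_unchanged_indexConverter := by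
  unfold Claim_unchanged_indexConverter Spec_indexConverter
  intro s1 s2 idx _hDom hPre hD
  unfold Pre_indexConverter at hPre
  unfold D_indexConverter at hD
  unfold indexConverter indexConverter_alt
  rw [PySem.Str.find_eq]
  exact main_eq s1.toList s2.toList idx hPre hD

theorem indexConverter_tight : Claim_exact_indexConverter := by
  unfold Claim_exact_indexConverter
  intro s1 s2 idx _hDom _hPre hD
  unfold D_indexConverter at hD
  unfold indexConverter indexConverter_alt
  rw [PySem.Str.find_eq]
  exact main_ne s1.toList s2.toList idx hD

theorem indexConverter_changed : Claim_changed_indexConverter := by unfold Claim_changed_indexConverter; decide
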